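-- pv_equiv track=rewrite | github.com/bg0thakamauro/introducao_a_programacao_ISMAI | Ficha de trabalho 5/Mauro/exe38v2.py | contarletrasrepetidas
-- ===== SOURCE A (Python) =====
-- def contarletrasrepetidas(texto):
--     texto = texto.lower()
--     i = 0
--     contar = 0
--     for i in range (len(texto)-1):
--         if texto[i] == texto[i+1]:
--             contar += 1
--     return contar
-- ===== SOURCE B (Python) =====
-- def contarletrasrepetidas(texto):
--     t = texto.lower()
--
--     def conta(lo, hi):
--         # adjacent equal pairs with both indices inside t[lo:hi]
--         if hi - lo < 2:
--             return 0
--         mid = (lo + hi) // 2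
--         cruza = 1 if t[mid - 1] == t[mid] else 0
--         return conta(lo, mid) + conta(mid, hi) + cruza
--
--     return conta(0, len(t))
-- ===== Notes on version B (the rewrite author's own statement) =====
-- stated objective: alternative
-- what changed: B counts adjacent equal pairs by divide and conquer: split the lowercased text at the midpoint, recurse on both halves, and add one if the pair straddling the midpoint is equal, instead of A's linear index loop over consecutive positions.
import Mathlib
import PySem

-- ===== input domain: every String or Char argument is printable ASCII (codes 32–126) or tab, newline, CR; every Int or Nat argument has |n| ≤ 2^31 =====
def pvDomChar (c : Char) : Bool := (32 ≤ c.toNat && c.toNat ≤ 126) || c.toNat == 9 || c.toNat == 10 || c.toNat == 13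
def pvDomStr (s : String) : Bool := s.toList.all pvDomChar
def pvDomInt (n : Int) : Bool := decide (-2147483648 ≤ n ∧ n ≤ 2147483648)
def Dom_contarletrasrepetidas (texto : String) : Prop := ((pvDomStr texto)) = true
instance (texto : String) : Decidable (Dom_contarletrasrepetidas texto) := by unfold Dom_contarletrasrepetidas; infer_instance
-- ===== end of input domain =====

-- B replaces A's linear index loop over consecutive positions by a divide-and-conquer
-- recursion: pairs in t[lo:hi] = pairs in the two halves + the pair crossing the midpoint
-- (objective: alternative).

-- ===== PORT A =====
-- for i in range(len(texto)-1): if texto[i] == texto[i+1]: contar += 1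
-- (indices i and i+1 are always in range here, so pyGetD with a default is exact)
def contarletrasrepetidas (texto : String) : Int :=
  let l := (PySem.Str.lower texto).toList
  (PySem.List.pyRange 0 ((l.length : Int) - 1) 1).foldl
    (fun contar i =>
      if PySem.List.pyGetD l i ' ' = PySem.List.pyGetD l (i + 1) ' ' then contar + 1
      else contar)
    0

-- ===== PORT B =====
-- conta(lo, hi) of Source B; 0 ≤ lo < mid < hi ≤ len when it indexes, so pyGetD is exact.
-- The Nat fuel only guards totality: the interval halves, so fuel ≥ hi - lo suffices.
def pvConta (t : List Char) : Nat → Int → Int → Int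
  | 0, _, _ => 0
  | fuel + 1, lo, hi =>
      if hi - lo < 2 then 0
      else
        let mid := PySem.Int.floordiv (lo + hi) 2
        let cruza : Int :=
          if PySem.List.pyGetD t (mid - 1) ' ' = PySem.List.pyGetD t mid ' ' then 1 else 0
        pvConta t fuel lo mid + pvConta t fuel mid hi + cruza

def contarletrasrepetidas_alt (texto : String) : Int :=
  let t := (PySem.Str.lower texto).toList
  pvConta t t.length 0 (t.length : Int)

-- ===== PRECONDITION & SPEC =====
def Spec_contarletrasrepetidas (texto : String) (out : Int) : Prop := out = contarletrasrepetidas_alt texto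
instance (texto : String) (out : Int) : Decidable (Spec_contarletrasrepetidas texto out) := by unfold Spec_contarletrasrepetidas; infer_instance

-- ===== CLAIM (what is proved, stated in full; the proofs are below) =====
def Claim_equal_contarletrasrepetidas : Prop := ∀ (texto : String), Dom_contarletrasrepetidas texto → Spec_contarletrasrepetidas texto (contarletrasrepetidas texto)

-- ===== LEMMAS AND PROOFS =====

-- number of adjacent equal pairs, recursively (common characterisation of both ports)
def pvCnt : List Char → Int
  | a :: b :: t => (if a = b then 1 else 0) + pvCnt (b :: t)
  | _ => 0

-- the pair crossing a split point
def pvCruza : Option Char → Option Char → Int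
  | some a, some b => if a = b then 1 else 0
  | _, _ => 0

theorem pvCnt_short (l : List Char) (h : l.length ≤ 1) : pvCnt l = 0 := by
  match l with
  | [] => rfl
  | [_] => rfl
  | _ :: _ :: _ => simp at h

theorem pvCnt_append (xs ys : List Char) :
    pvCnt (xs ++ ys) = pvCnt xs + pvCnt ys + pvCruza xs.getLast? ys.head? := by
  induction xs with
  | nil => cases ys <;> simp [pvCnt, pvCruza]
  | cons a xs ih =>
      cases xs with
      | nil =>
          cases ys with
          | nil => simp [pvCnt, pvCruza]
          | cons b t => simp [pvCnt, pvCruza]; ring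
      | cons b xs' =>
          rw [List.cons_append] at ih
          simp only [List.cons_append, pvCnt, List.getLast?_cons_cons]
          rw [ih]
          ring

theorem pvConta_eq (t : List Char) :
    ∀ (n : Nat) (lo hi : Int), (hi - lo).toNat ≤ n → 0 ≤ lo → lo ≤ hi → hi ≤ (t.length : Int) →
      pvConta t n lo hi = pvCnt ((t.drop lo.toNat).take (hi - lo).toNat) := by
  intro n
  induction n with
  | zero =>
      intro lo hi hn h0 hlh _
      have : (hi - lo).toNat = 0 := by omega
      simp [pvConta, this, pvCnt]
  | succ n ih =>
      intro lo hi hn h0 hlh hhl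
      rw [pvConta]
      by_cases hsmall : hi - lo < 2
      · rw [if_pos hsmall]
        have := pvCnt_short ((t.drop lo.toNat).take (hi - lo).toNat)
          (le_trans (List.length_take_le _ _) (by omega))
        omega
      · rw [if_neg hsmall]
        dsimp only
        obtain ⟨mid, hmiddef⟩ : ∃ m, m = PySem.Int.floordiv (lo + hi) 2 := ⟨_, rfl⟩
        rw [← hmiddef]
        have hmid : mid = (lo + hi) / 2 := by
          rw [hmiddef]; exact PySem.Int.floordiv_eq_ediv_of_pos (by omega)
        have hb1 : lo + 1 ≤ mid := by omega
        have hb2 : mid ≤ hi - 1 := by omega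
        have h1 := ih lo mid (by omega) h0 (by omega) (by omega)
        have h2 := ih mid hi (by omega) (by omega) (by omega) hhl
        rw [h1, h2]
        -- split the RHS slice at mid
        have hsplit : (hi - lo).toNat = (mid - lo).toNat + (hi - mid).toNat := by omega
        rw [hsplit, List.take_add]
        have hdd : (t.drop lo.toNat).drop (mid - lo).toNat = t.drop mid.toNat := by
          rw [List.drop_drop]
          congr 1
          omega
        rw [hdd, pvCnt_append]
        -- identify the boundary characters
        have hmlt : mid.toNat < t.length := by omega
        have hm1lt : mid.toNat - 1 < t.length := by omega
        have hlast : ((t.drop lo.toNat).take (mid - lo).toNat).getLast? = some t[mid.toNat - 1] := by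
          have hlen : ((t.drop lo.toNat).take (mid - lo).toNat).length = (mid - lo).toNat := by
            simp; omega
          rw [List.getLast?_eq_getElem?, hlen, List.getElem?_take_of_lt (by omega),
            List.getElem?_drop]
          have : lo.toNat + ((mid - lo).toNat - 1) = mid.toNat - 1 := by omega
          rw [this, List.getElem?_eq_getElem hm1lt]
        have hhead : ((t.drop mid.toNat).take (hi - mid).toNat).head? = some t[mid.toNat] := by
          rw [List.head?_eq_getElem?, List.getElem?_take_of_lt (by omega), List.getElem?_drop]
          simp [List.getElem?_eq_getElem hmlt]
        rw [hlast, hhead]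
        have hg1 : PySem.List.pyGetD t (mid - 1) ' ' = t[(mid - 1).toNat] := by
          apply PySem.List.pyGetD_eq_getElem <;> omega
        have hg2 : PySem.List.pyGetD t mid ' ' = t[mid.toNat] := by
          apply PySem.List.pyGetD_eq_getElem <;> omega
        have hidx : (mid - 1).toNat = mid.toNat - 1 := by omega
        simp only [hg1, hg2, hidx, pvCruza]

theorem pvAlt_eq_cnt (texto : String) :
    contarletrasrepetidas_alt texto = pvCnt (PySem.Str.lower texto).toList := by
  unfold contarletrasrepetidas_alt
  set t := (PySem.Str.lower texto).toList
  rw [pvConta_eq t t.length 0 (t.length : Int) (by omega) (by omega) (by omega) (by omega)]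
  simp

-- A-side: the index loop computes pvCnt
theorem pvGetD_append_mid (pre l : List Char) (k : Nat) (h : k < l.length) (d : Char) :
    PySem.List.pyGetD (pre ++ l) ((pre.length : Int) + (k : Int)) d = l[k] := by
  have := PySem.List.pyGet?_append_right (pre := pre) (ys := l) (k := k)
  simp [PySem.List.pyGetD, this, h]

theorem pvA_go (full : List Char) :
    ∀ (rest pre : List Char) (c : Int), full = pre ++ rest →
    (PySem.List.pyRange (pre.length : Int) ((pre.length : Int) + (rest.length : Int) - 1) 1).foldl
      (fun contar i =>
        if PySem.List.pyGetD full i ' ' = PySem.List.pyGetD full (i + 1) ' ' then contar + 1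
        else contar) c
      = c + pvCnt rest := by
  intro rest
  induction rest with
  | nil =>
      intro pre c _
      rw [PySem.List.pyRange_one_eq_nil (by simp)]
      simp [pvCnt]
  | cons a rest' ih =>
      intro pre c hfull
      cases rest' with
      | nil =>
          rw [PySem.List.pyRange_one_eq_nil (by simp)]
          simp [pvCnt]
      | cons b t =>
          rw [PySem.List.pyRange_one_cons (by push_cast [List.length_cons]; omega)]
          simp only [List.foldl_cons]
          have h0 : PySem.List.pyGetD full (pre.length : Int) ' ' = a := by
            rw [hfull]
            simp
          have h1 : PySem.List.pyGetD full ((pre.length : Int) + 1) ' ' = b := by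
            have := pvGetD_append_mid pre (a :: b :: t) 1 (by simp) ' '
            simpa [hfull] using this
          have hstep := ih (pre ++ [a])
            (if PySem.List.pyGetD full (pre.length : Int) ' '
                = PySem.List.pyGetD full ((pre.length : Int) + 1) ' ' then c + 1 else c)
            (by simpa using hfull)
          have hlen : ((pre ++ [a]).length : Int) = (pre.length : Int) + 1 := by
            simp
          rw [hlen] at hstep
          have hb : (pre.length : Int) + 1 + ((b :: t).length : Int) - 1
              = (pre.length : Int) + ((a :: b :: t).length : Int) - 1 := by
            push_cast [List.length_cons]; ring
          rw [hb] at hstep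
          rw [hstep, h0, h1]
          by_cases hab : a = b
          · simp [pvCnt, hab]; ring
          · simp [pvCnt, hab]

-- ===== VERDICT (by name: the statement is the Claim_ definition above) =====
theorem contarletrasrepetidas_spec : Claim_equal_contarletrasrepetidas := by
  intro texto _
  show contarletrasrepetidas texto = contarletrasrepetidas_alt texto
  rw [pvAlt_eq_cnt]
  unfold contarletrasrepetidas
  dsimp only
  have := pvA_go ((PySem.Str.lower texto).toList) ((PySem.Str.lower texto).toList) [] 0 (by simp)
  simp only [List.length_nil, Nat.cast_zero, zero_add] at this
  rw [this]
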